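-- pv_equiv track=rewrite | github.com/Nareeek/Codesignal_tasks | alternatingSort.py | alternatingSort
-- ===== SOURCE A (Python) =====
-- def alternatingSort(a):
--     a1 = a[: len(a) // 2]
--     a2 = a[len(a) // 2:]
--     a2.reverse()
--     a3 = []
--     b = []
--     if len(a) % 2 != 0:
--         if len(a1) > len(a2):
--             a3.append(a1[-1])
--             a1.remove(a1[-1])
--         else:
--             a3.append(a2[-1])
--             a2.remove(a2[-1])
--
--     for i in range(len(a1)):
--         b.append(a1[i])
--         b.append(a2[i])
--
--     if len(a3) != 0:
--         b.append(a3[0])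
--
--     return sorted(set(b)) == b
-- ===== SOURCE B (Python) =====
-- def alternatingSort(a):
--     n = len(a)
--     half = n // 2
--     b = []
--     for x, y in zip(a[:half], a[::-1]):
--         b.append(x)
--         b.append(y)
--     if n % 2:
--         b.append(a[half])
--     return all(x < y for x, y in zip(b, b[1:]))
-- ===== Notes on version B (the rewrite author's own statement) =====
-- stated objective: faster
-- what changed: B builds the interleaved list in one zip pass over the list and its reverse and checks strict increase of adjacent pairs (with short-circuit), instead of A's slice/reverse/remove bookkeeping followed by sorted(set(b)) == b.
import Mathlib
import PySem

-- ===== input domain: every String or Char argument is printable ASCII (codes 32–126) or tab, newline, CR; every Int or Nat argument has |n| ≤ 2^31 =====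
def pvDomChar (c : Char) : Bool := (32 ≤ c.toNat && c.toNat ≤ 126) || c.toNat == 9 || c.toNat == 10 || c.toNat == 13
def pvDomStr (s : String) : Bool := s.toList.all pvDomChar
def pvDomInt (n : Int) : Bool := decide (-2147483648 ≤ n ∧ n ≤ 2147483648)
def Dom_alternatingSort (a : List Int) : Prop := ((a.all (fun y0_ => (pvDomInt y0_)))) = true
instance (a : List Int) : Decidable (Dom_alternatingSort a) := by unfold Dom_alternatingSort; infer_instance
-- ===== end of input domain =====

-- B builds the interleaved list in one zip pass over the list and its reverse and checks
-- strict increase of adjacent pairs, instead of A's slice/remove bookkeeping plus sorted(set(b)) == b.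

-- ===== PORT A =====
-- a1[-1]/a2[-1] and list.remove are only reached where the list is nonempty and the value present
-- (Python never raises here), so the total forms pyGetD / (remove? …).getD are exact.
def alternatingSort (a : List Int) : Bool :=
  let a1 := PySem.List.slice a none (some (PySem.Int.floordiv (a.length : Int) 2))
  let a2 := (PySem.List.slice a (some (PySem.Int.floordiv (a.length : Int) 2)) none).reverse
  let s :=
    if PySem.Int.mod (a.length : Int) 2 ≠ 0 then
      if a1.length > a2.length then
        let v := PySem.List.pyGetD a1 (-1) 0
        ((PySem.List.remove? a1 v).getD a1, a2, [v])
      else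
        let v := PySem.List.pyGetD a2 (-1) 0
        (a1, (PySem.List.remove? a2 v).getD a2, [v])
    else (a1, a2, ([] : List Int))
  let b := (PySem.List.pyRange 0 (s.1.length : Int) 1).foldl
      (fun b i => (b ++ [PySem.List.pyGetD s.1 i 0]) ++ [PySem.List.pyGetD s.2.1 i 0]) []
  let b := if s.2.2.length ≠ 0 then b ++ [PySem.List.pyGetD s.2.2 0 0] else b
  PySem.List.sorted (PySem.Set.ofList b) (fun x => x) false == b

-- ===== PORT B =====
-- a[::-1] is List.reverse (PySem.List.slice?_none_none_neg_one), b[1:] is List.tail (slice_from_one).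
def alternatingSort_alt (a : List Int) : Bool :=
  let half := PySem.Int.floordiv (a.length : Int) 2
  let b := ((PySem.List.slice a none (some half)).zip a.reverse).foldl
      (fun b p => (b ++ [p.1]) ++ [p.2]) []
  let b := if PySem.Int.mod (a.length : Int) 2 ≠ 0 then b ++ [PySem.List.pyGetD a half 0] else b
  (b.zip b.tail).all (fun p => decide (p.1 < p.2))

-- ===== PRECONDITION & SPEC =====
def Spec_alternatingSort (a : List Int) (out : Bool) : Prop := out = alternatingSort_alt a
instance (a : List Int) (out : Bool) : Decidable (Spec_alternatingSort a out) := by unfold Spec_alternatingSort; infer_instance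

-- ===== CLAIM (what is proved, stated in full; the proofs are below) =====
def Claim_equal_alternatingSort : Prop := ∀ (a : List Int), Dom_alternatingSort a → Spec_alternatingSort a (alternatingSort a)

-- ===== LEMMAS AND PROOFS =====

-- flatten of a zipped pair list
def ilv (xs ys : List Int) : List Int := (xs.zip ys).flatMap (fun p => [p.1, p.2])

lemma foldl_pairs (l : List (Int × Int)) (acc : List Int) :
    l.foldl (fun b p => (b ++ [p.1]) ++ [p.2]) acc = acc ++ l.flatMap (fun p => [p.1, p.2]) := by
  induction l generalizing acc with
  | nil => simp
  | cons x t ih => simp [List.flatMap]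

lemma zip_append_of_le (xs ys zs : List Int) (h : xs.length ≤ ys.length) :
    xs.zip (ys ++ zs) = xs.zip ys := by
  induction xs generalizing ys with
  | nil => simp
  | cons x t ih =>
    cases ys with
    | nil => simp at h
    | cons y u =>
      simp only [List.length_cons] at h
      simp only [List.cons_append, List.zip_cons_cons]
      rw [ih u (by omega)]

lemma range_interleave (xs ys : List Int) (n : Nat) (hx : n ≤ xs.length) (hy : n ≤ ys.length)
    (acc : List Int) :
    (List.range n).foldl (fun b i => (b ++ [xs.getD i 0]) ++ [ys.getD i 0]) acc
      = acc ++ ((xs.take n).zip (ys.take n)).flatMap (fun p => [p.1, p.2]) := by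
  induction n generalizing acc with
  | zero => simp
  | succ m ih =>
    rw [List.range_succ, List.foldl_append]
    rw [ih (by omega) (by omega)]
    have hxm : m < xs.length := by omega
    have hym : m < ys.length := by omega
    rw [List.take_succ_eq_append_getElem hxm, List.take_succ_eq_append_getElem hym]
    rw [List.zip_append (by simp [hxm.le, hym.le])]
    simp [hxm, hym]

lemma foldl_range_interleave (xs ys : List Int) (hle : xs.length ≤ ys.length) :
    (PySem.List.pyRange 0 (xs.length : Int) 1).foldl
      (fun b i => (b ++ [PySem.List.pyGetD xs i 0]) ++ [PySem.List.pyGetD ys i 0]) []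
    = ilv xs ys := by
  rw [PySem.List.pyRange_zero_natCast, List.foldl_map]
  simp only [PySem.List.pyGetD_natCast]
  rw [range_interleave xs ys xs.length le_rfl hle []]
  rw [List.take_of_length_le le_rfl]
  conv_rhs => rw [show ys = ys.take xs.length ++ ys.drop xs.length by simp]
  rw [ilv, zip_append_of_le _ _ _ (by simp [hle])]
  simp

lemma mem_ilv_right (xs ys : List Int) (h : ys.length ≤ xs.length) (y : Int) (hy : y ∈ ys) :
    y ∈ ilv xs ys := by
  induction ys generalizing xs with
  | nil => simp at hy
  | cons z u ih =>
    cases xs with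
    | nil => simp at h
    | cons x t =>
      simp only [List.length_cons] at h
      rcases List.mem_cons.mp hy with rfl | hy'
      · simp [ilv]
      · have := ih t (by omega) hy'
        simp only [ilv, List.zip_cons_cons, List.flatMap_cons] at this ⊢
        simp only [List.mem_append]
        right
        simpa [ilv] using this

lemma pyGetD_neg_one (xs : List Int) (h : xs ≠ []) : PySem.List.pyGetD xs (-1) 0 = xs.getLast h := by
  have h1 : 1 ≤ xs.length := List.length_pos_iff.mpr h
  simp [PySem.List.pyGetD, PySem.List.pyGet?, PySem.List.pyIdx?, h1,
    ← List.getLast?_eq_getElem?, List.getLast?_eq_some_getLast h]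

lemma chkA_iff (l : List Int) :
    ((PySem.List.sorted (PySem.Set.ofList l) (fun x => x) false == l) = true) ↔ l.Pairwise (· < ·) := by
  constructor
  · intro h
    rw [beq_iff_eq] at h
    rw [← h]
    exact PySem.List.sorted_ofList_pairwise_lt l
  · intro hp
    rw [beq_iff_eq]
    apply PySem.List.sorted_eq_of_perm_of_pairwise_lt
    · refine (List.perm_ext_iff_of_nodup (hp.imp (fun h => ne_of_lt h)) (PySem.Set.nodup_ofList l)).mpr ?_
      intro x; simp [PySem.Set.mem_ofList]
    · exact hp

lemma chkB_iff (l : List Int) :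
    ((l.zip l.tail).all (fun p => decide (p.1 < p.2)) = true) ↔ l.Pairwise (· < ·) := by
  rw [← List.isChain_iff_pairwise]
  induction l with
  | nil => simp
  | cons x t ih =>
    cases t with
    | nil => simp
    | cons y u =>
      simp only [List.tail_cons, List.zip_cons_cons, List.all_cons] at ih ⊢
      rw [List.isChain_cons_cons]
      simp [ih]

lemma not_pairwise_append_self (l : List Int) (v : Int) (hv : v ∈ l) :
    ¬ (l ++ [v]).Pairwise (· < ·) := by
  intro hp
  rw [List.pairwise_append] at hp
  exact lt_irrefl v (hp.2.2 v hv v (by simp))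

def bA (a : List Int) : List Int :=
  if a.length % 2 = 1 then
    ilv (a.take (a.length / 2)) (((a.drop (a.length / 2)).reverse).erase (a.getD (a.length / 2) 0))
      ++ [a.getD (a.length / 2) 0]
  else ilv (a.take (a.length / 2)) ((a.drop (a.length / 2)).reverse)

def bB (a : List Int) : List Int :=
  if a.length % 2 = 1 then ilv (a.take (a.length / 2)) a.reverse ++ [a.getD (a.length / 2) 0]
  else ilv (a.take (a.length / 2)) a.reverse

lemma portA_eval (a : List Int) :
    alternatingSort a
      = (PySem.List.sorted (PySem.Set.ofList (bA a)) (fun x => x) false == bA a) := by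
  have hfd : PySem.Int.floordiv ((a.length : Int)) 2 = ((a.length / 2 : Nat) : Int) := by simp
  by_cases hpar : a.length % 2 = 1
  · -- odd
    have hlt : a.length / 2 < a.length := by omega
    have hd : (a.drop (a.length / 2)).reverse
        = (a.drop (a.length / 2 + 1)).reverse ++ [a[a.length / 2]] := by
      rw [List.drop_eq_getElem_cons hlt]; simp
    have hne : (a.drop (a.length / 2)).reverse ≠ [] := by
      simp [List.reverse_eq_nil_iff, List.drop_eq_nil_iff]; omega
    have hv : PySem.List.pyGetD ((a.drop (a.length / 2)).reverse) (-1) 0 = a[a.length / 2] := by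
      rw [pyGetD_neg_one _ hne]
      simp [hd]
    have hvmem : a[a.length / 2] ∈ (a.drop (a.length / 2)).reverse := by
      rw [hd]; simp
    have hlen1 : (a.take (a.length / 2)).length = a.length / 2 := by simp; omega
    have hlen2 : (((a.drop (a.length / 2)).reverse).erase a[a.length / 2]).length = a.length / 2 := by
      rw [List.length_erase_of_mem hvmem]; simp; omega
    have hmod : PySem.Int.mod ((a.length : Int)) 2 ≠ 0 := by simp; omega
    have hgt : ¬((a.take (a.length / 2)).length > ((a.drop (a.length / 2)).reverse).length) := by
      simp; omega
    unfold alternatingSort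
    rw [hfd, PySem.List.slice_to_natCast, PySem.List.slice_from_natCast]
    dsimp only
    simp only [if_pos hmod, if_neg hgt, hv]
    rw [PySem.List.remove?_eq_some_erase _ _ hvmem]
    simp only [Option.getD_some]
    rw [if_pos (by simp)]
    rw [foldl_range_interleave _ _ (by rw [hlen1, hlen2])]
    have hbA : bA a = ilv (a.take (a.length / 2)) (((a.drop (a.length / 2)).reverse).erase a[a.length / 2]) ++ [a[a.length / 2]] := by
      unfold bA
      rw [if_pos hpar, List.getD_eq_getElem _ _ hlt]
    rw [hbA]
    rfl
  · -- even
    have hmod : ¬(PySem.Int.mod ((a.length : Int)) 2 ≠ 0) := by simp; omega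
    unfold alternatingSort
    rw [hfd, PySem.List.slice_to_natCast, PySem.List.slice_from_natCast]
    dsimp only
    simp only [if_neg hmod]
    rw [if_neg (by simp)]
    rw [foldl_range_interleave _ _ (by simp; omega)]
    have hbA : bA a = ilv (a.take (a.length / 2)) ((a.drop (a.length / 2)).reverse) := by
      unfold bA; rw [if_neg hpar]
    rw [hbA]

lemma portB_eval (a : List Int) :
    alternatingSort_alt a = ((bB a).zip (bB a).tail).all (fun p => decide (p.1 < p.2)) := by
  have hfd : PySem.Int.floordiv ((a.length : Int)) 2 = ((a.length / 2 : Nat) : Int) := by simp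
  unfold alternatingSort_alt
  rw [hfd]
  dsimp only
  rw [PySem.List.slice_to_natCast]
  rw [foldl_pairs]
  by_cases hpar : a.length % 2 = 1
  · have hmod : PySem.Int.mod ((a.length : Int)) 2 ≠ 0 := by simp; omega
    simp only [if_pos hmod, PySem.List.pyGetD_natCast]
    have hbB : bB a = ilv (a.take (a.length / 2)) a.reverse ++ [a.getD (a.length / 2) 0] := by
      unfold bB; rw [if_pos hpar]
    rw [hbB]
    rfl
  · have hmod : ¬(PySem.Int.mod ((a.length : Int)) 2 ≠ 0) := by simp; omega
    simp only [if_neg hmod]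
    have hbB : bB a = ilv (a.take (a.length / 2)) a.reverse := by
      unfold bB; rw [if_neg hpar]
    rw [hbB]
    rfl

lemma key (a : List Int) : (bA a).Pairwise (· < ·) ↔ (bB a).Pairwise (· < ·) := by
  have hrev : a.reverse = (a.drop (a.length / 2)).reverse ++ (a.take (a.length / 2)).reverse := by
    conv_lhs => rw [← List.take_append_drop (a.length / 2) a]
    rw [List.reverse_append]
  by_cases hpar : a.length % 2 = 1
  · have hlt : a.length / 2 < a.length := by omega
    have hd : (a.drop (a.length / 2)).reverse
        = (a.drop (a.length / 2 + 1)).reverse ++ [a[a.length / 2]] := by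
      rw [List.drop_eq_getElem_cons hlt]; simp
    have hlenL : ((a.drop (a.length / 2 + 1)).reverse).length = a.length / 2 := by simp; omega
    have hlen1 : (a.take (a.length / 2)).length = a.length / 2 := by simp; omega
    have hgd : a.getD (a.length / 2) 0 = a[a.length / 2] := List.getD_eq_getElem _ _ hlt
    have hB : bB a = ilv (a.take (a.length / 2)) ((a.drop (a.length / 2 + 1)).reverse)
        ++ [a[a.length / 2]] := by
      unfold bB
      rw [if_pos hpar, hgd]
      congr 1
      rw [hrev, hd, List.append_assoc]
      unfold ilv
      rw [zip_append_of_le _ _ _ (by rw [hlen1, hlenL])]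
    by_cases hvL : a[a.length / 2] ∈ (a.drop (a.length / 2 + 1)).reverse
    · have hA : bA a = ilv (a.take (a.length / 2))
          (((a.drop (a.length / 2 + 1)).reverse).erase a[a.length / 2] ++ [a[a.length / 2]])
          ++ [a[a.length / 2]] := by
        unfold bA
        rw [if_pos hpar, hgd, hd, List.erase_append_left _ hvL]
      have hpos : 0 < ((a.drop (a.length / 2 + 1)).reverse).length := List.length_pos_of_mem hvL
      have hlen3 : ((((a.drop (a.length / 2 + 1)).reverse).erase a[a.length / 2])
          ++ [a[a.length / 2]]).length ≤ (a.take (a.length / 2)).length := by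
        rw [List.length_append, List.length_erase_of_mem hvL, hlen1]
        simp
        omega
      rw [hA, hB]
      constructor
      · intro hp
        exact absurd hp (not_pairwise_append_self _ _ (mem_ilv_right _ _ hlen3 _ (by simp)))
      · intro hp
        exact absurd hp (not_pairwise_append_self _ _ (mem_ilv_right _ _
          (by rw [hlenL, hlen1]) _ hvL))
    · have hA : bA a = ilv (a.take (a.length / 2)) ((a.drop (a.length / 2 + 1)).reverse)
          ++ [a[a.length / 2]] := by
        unfold bA
        rw [if_pos hpar, hgd, hd, List.erase_append_right _ hvL]
        simp
      rw [hA, hB]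
  · have hA : bA a = ilv (a.take (a.length / 2)) ((a.drop (a.length / 2)).reverse) := by
      unfold bA; rw [if_neg hpar]
    have hB : bB a = ilv (a.take (a.length / 2)) ((a.drop (a.length / 2)).reverse) := by
      unfold bB
      rw [if_neg hpar, hrev]
      unfold ilv
      rw [zip_append_of_le _ _ _ (by simp; omega)]
    rw [hA, hB]

-- ===== VERDICT (by name: the statement is the Claim_ definition above) =====
theorem alternatingSort_spec : Claim_equal_alternatingSort := by
  intro a _
  unfold Spec_alternatingSort
  rw [portA_eval, portB_eval]
  exact Bool.coe_iff_coe.mp (((chkA_iff (bA a)).trans (key a)).trans (chkB_iff (bB a)).symm)
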